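-- pv_equiv track=rewrite | github.com/kinoshitayoshihiro/composer4 | generator/obligato_generator.py | _nearest_scale_note
-- ===== SOURCE A (Python) =====
-- from typing import Any, Dict, List, Tuple, Optional
--
-- def _nearest_scale_note(midi: int, pcs: List[int]) -> int:
--     if not pcs:
--         return midi
--     best = midi
--     best_d = 128
--     for off in range(-6, 7):
--         cand = midi + off
--         if (cand % 12) in pcs:
--             d = abs(off)
--             if d < best_d:
--                 best, best_d = cand, d
--     return best
-- ===== SOURCE B (Python) =====
-- def _nearest_scale_note(midi: int, pcs: list) -> int:
--     if not pcs:
--         return midi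
--     for d in range(7):
--         if (midi - d) % 12 in pcs:
--             return midi - d
--         if (midi + d) % 12 in pcs:
--             return midi + d
--     return midi
-- ===== Notes on version B (the rewrite author's own statement) =====
-- stated objective: simpler
-- what changed: Replaces the full -6..6 scan with a running best/best_d minimum by an expanding-ring search that returns at the first hit (distance d = 0..6, negative offset checked first to keep A's tie-break).
import Mathlib
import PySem

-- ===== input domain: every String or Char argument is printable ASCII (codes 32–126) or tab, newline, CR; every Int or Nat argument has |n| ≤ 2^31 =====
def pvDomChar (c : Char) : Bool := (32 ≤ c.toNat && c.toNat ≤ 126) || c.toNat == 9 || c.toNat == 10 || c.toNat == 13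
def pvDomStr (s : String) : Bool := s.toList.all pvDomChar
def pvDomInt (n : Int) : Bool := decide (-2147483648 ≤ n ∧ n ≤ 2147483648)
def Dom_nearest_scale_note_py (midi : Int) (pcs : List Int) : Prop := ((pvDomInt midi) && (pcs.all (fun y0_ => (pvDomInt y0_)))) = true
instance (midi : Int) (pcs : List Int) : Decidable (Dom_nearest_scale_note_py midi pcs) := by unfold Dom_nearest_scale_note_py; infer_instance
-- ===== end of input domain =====

-- B replaces A's full -6..6 scan with running minimum by an expanding-ring search
-- (d = 0..6, negative offset first) that returns at the first hit: simpler control flow.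

-- ===== PORT A =====
def nearest_scale_note_py (midi : Int) (pcs : List Int) : Int :=
  if pcs = [] then midi
  else
    (((PySem.List.pyRange (-6) 7 1).foldl
      (fun (st : Int × Int) off =>
        let cand := midi + off
        if PySem.Int.mod cand 12 ∈ pcs then
          let d := |off|
          if d < st.2 then (cand, d) else st
        else st)
      (midi, 128))).1

-- ===== PORT B =====
-- the `for d in range(7)` loop with early return, as recursion over the range list
def pvRingNote (midi : Int) (pcs : List Int) : List Int → Option Int
  | [] => none
  | d :: rest =>
    if PySem.Int.mod (midi - d) 12 ∈ pcs then some (midi - d)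
    else if PySem.Int.mod (midi + d) 12 ∈ pcs then some (midi + d)
    else pvRingNote midi pcs rest

def nearest_scale_note_py_alt (midi : Int) (pcs : List Int) : Int :=
  if pcs = [] then midi
  else (pvRingNote midi pcs (PySem.List.pyRange 0 7 1)).getD midi

-- ===== PRECONDITION & SPEC =====
def Spec_nearest_scale_note_py (midi : Int) (pcs : List Int) (out : Int) : Prop := out = nearest_scale_note_py_alt midi pcs
instance (midi : Int) (pcs : List Int) (out : Int) : Decidable (Spec_nearest_scale_note_py midi pcs out) := by unfold Spec_nearest_scale_note_py; infer_instance

-- ===== CLAIM (what is proved, stated in full; the proofs are below) =====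
def Claim_equal_nearest_scale_note_py : Prop := ∀ (midi : Int) (pcs : List Int), Dom_nearest_scale_note_py midi pcs → Spec_nearest_scale_note_py midi pcs (nearest_scale_note_py midi pcs)

-- ===== LEMMAS AND PROOFS =====

-- abstract versions over a predicate on offsets (midi factored out)
def pvAFold (p : Int → Bool) : List Int → Int × Int → Int × Int
  | [], st => st
  | off :: rest, st =>
      pvAFold p rest (if p off then (if |off| < st.2 then (off, |off|) else st) else st)
def pvBSearch (p : Int → Bool) : List Int → Option Int
  | [] => none
  | d :: rest => if p (-d) then some (-d) else if p d then some d else pvBSearch p rest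

def pvDL : Nat → List Int
  | 0 => [0]
  | n + 1 => pvDL n ++ [(n : Int) + 1]
def pvRL : Nat → List Int
  | 0 => [0]
  | n + 1 => (-((n : Int) + 1)) :: (pvRL n ++ [(n : Int) + 1])

theorem pvAFold_append (p : Int → Bool) (L1 L2 : List Int) :
    ∀ st, pvAFold p (L1 ++ L2) st = pvAFold p L2 (pvAFold p L1 st) := by
  induction L1 with
  | nil => intro st; simp [pvAFold]
  | cons a t ih => intro st; simp [pvAFold, ih]

theorem pvBSearch_append (p : Int → Bool) (L1 L2 : List Int) :
    pvBSearch p (L1 ++ L2) =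
      match pvBSearch p L1 with
      | some o => some o
      | none => pvBSearch p L2 := by
  induction L1 with
  | nil => simp [pvBSearch]
  | cons a t ih =>
    simp only [List.cons_append, pvBSearch, ih]
    by_cases h1 : p (-a) = true
    · simp [h1]
    · by_cases h2 : p a = true <;> simp [h1, h2]

theorem pvBSearch_dL_bound (p : Int → Bool) :
    ∀ (n : Nat) (o : Int), pvBSearch p (pvDL n) = some o → |o| ≤ (n : Int) := by
  intro n
  induction n with
  | zero =>
    intro o h
    simp only [pvDL, pvBSearch, neg_zero] at h
    split at h
    · injection h with h'
      rw [← h']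
      simp
    · exact absurd h (by simp)
  | succ n ih =>
    intro o h
    rw [pvDL, pvBSearch_append p] at h
    cases hb : pvBSearch p (pvDL n) with
    | some o2 =>
      rw [hb] at h
      injection h with h'
      have h2 := ih o2 hb
      rw [← h']
      exact h2.trans (by push_cast; omega)
    | none =>
      rw [hb] at h
      simp only [pvBSearch] at h
      split at h
      · injection h with h'
        rw [← h', abs_neg, abs_of_nonneg (show (0:Int) ≤ (n:Int) + 1 by positivity)]
        push_cast
        omega
      · split at h
        · injection h with h'
          rw [← h', abs_of_nonneg (show (0:Int) ≤ (n:Int) + 1 by positivity)]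
          push_cast
          omega
        · exact absurd h (by simp)

theorem pvAFold_single (p : Int → Bool) (k : Int) (st : Int × Int) :
    pvAFold p [k] st = if p k then (if |k| < st.2 then (k, |k|) else st) else st := by
  simp [pvAFold]

theorem pvRing (p : Int → Bool) :
    ∀ (n : Nat) (x e : Int), (n : Int) < e →
      pvAFold p (pvRL n) (x, e) =
        match pvBSearch p (pvDL n) with
        | some o => (o, |o|)
        | none => (x, e) := by
  intro n
  induction n with
  | zero =>
    intro x e he
    have h0 : (0 : Int) < e := by exact_mod_cast he
    simp only [pvRL, pvDL, pvBSearch, neg_zero, pvAFold_single]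
    by_cases h : p 0 = true
    · simp [h, pvAFold, h0]
    · simp [h, pvAFold]
  | succ n ih =>
    intro x e he
    have hne : ((n : Int) + 1) < e := by push_cast at he; omega
    have habs : |(-((n : Int) + 1))| = (n : Int) + 1 := by
      rw [abs_neg]; exact abs_of_nonneg (by positivity)
    have habs2 : |((n : Int) + 1)| = (n : Int) + 1 := abs_of_nonneg (by positivity)
    have hstep : pvAFold p (pvRL (n + 1)) (x, e)
        = pvAFold p [((n : Int) + 1)]
            (pvAFold p (pvRL n)
              (if p (-((n : Int) + 1)) = true then ((-((n : Int) + 1)), (n : Int) + 1) else (x, e))) := by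
      rw [pvRL]
      show pvAFold p _ _ = _
      simp only [pvAFold, pvAFold_append, habs, if_pos hne]
    rw [hstep, pvDL, pvBSearch_append p]
    by_cases h1 : p (-((n : Int) + 1)) = true
    · rw [if_pos h1, ih (-((n : Int) + 1)) ((n : Int) + 1) (by omega)]
      cases hb : pvBSearch p (pvDL n) with
      | some o =>
        have hbo := pvBSearch_dL_bound p n o hb
        have hlt : ¬ (|((n : Int) + 1)| < (o, |o|).2) := by
          simp only [habs2]
          exact not_lt.mpr (hbo.trans (by omega))
        rw [pvAFold_single]
        by_cases h2 : p ((n : Int) + 1) = true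
        · rw [if_pos h2, if_neg hlt]
        · rw [if_neg h2]
      | none =>
        have hlt : ¬ (|((n : Int) + 1)| < ((-((n : Int) + 1)), (n : Int) + 1).2) := by
          simp [habs2]
        have h1' : p (-1 + -(n : Int)) = true := by
          rw [show (-1 + -(n : Int)) = -((n : Int) + 1) by ring]; exact h1
        have habs' : |(-1 + -(n : Int))| = (n : Int) + 1 := by
          rw [show (-1 + -(n : Int)) = -((n : Int) + 1) by ring, habs]
        rw [pvAFold_single]
        by_cases h2 : p ((n : Int) + 1) = true
        · rw [if_pos h2, if_neg hlt]
          simp [pvBSearch, h1', habs']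
        · rw [if_neg h2]
          simp [pvBSearch, h1', habs']
    · rw [if_neg h1, ih x e (by omega)]
      cases hb : pvBSearch p (pvDL n) with
      | some o =>
        have hbo := pvBSearch_dL_bound p n o hb
        have hlt : ¬ (|((n : Int) + 1)| < (o, |o|).2) := by
          simp only [habs2]
          exact not_lt.mpr (hbo.trans (by omega))
        rw [pvAFold_single]
        by_cases h2 : p ((n : Int) + 1) = true
        · rw [if_pos h2, if_neg hlt]
        · rw [if_neg h2]
      | none =>
        have h1' : ¬ p (-1 + -(n : Int)) = true := by
          rw [show (-1 + -(n : Int)) = -((n : Int) + 1) by ring]; exact h1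
        rw [pvAFold_single]
        by_cases h2 : p ((n : Int) + 1) = true
        · rw [if_pos h2, if_pos (by simpa [habs2] using hne)]
          simp [pvBSearch, h1', h2, habs2]
        · rw [if_neg h2]
          simp [pvBSearch, h1', h2]


theorem pvKey (p : Int → Bool) :
    (pvAFold p (PySem.List.pyRange (-6) 7 1) (0, 128)).1
      = (pvBSearch p (PySem.List.pyRange 0 7 1)).getD 0 := by
  rw [show PySem.List.pyRange (-6) 7 1 = pvRL 6 by decide,
      show PySem.List.pyRange 0 7 1 = pvDL 6 by decide,
      pvRing p 6 0 128 (by norm_num)]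
  cases h : pvBSearch p (pvDL 6) with
  | none => simp
  | some o => simp

theorem pvMod12 (a : Int) : PySem.Int.mod a 12 = a % 12 := by simp

theorem pvShiftA (midi : Int) (pcs : List Int) :
    ∀ (offs : List Int) (st : Int × Int),
      offs.foldl
        (fun (st : Int × Int) off =>
          let cand := midi + off
          if PySem.Int.mod cand 12 ∈ pcs then
            let d := |off|
            if d < st.2 then (cand, d) else st
          else st)
        (midi + st.1, st.2)
      = (midi + (pvAFold (fun o => decide ((midi + o) % 12 ∈ pcs)) offs st).1,
         (pvAFold (fun o => decide ((midi + o) % 12 ∈ pcs)) offs st).2) := by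
  intro offs
  induction offs with
  | nil => intro st; simp [pvAFold]
  | cons off rest ih =>
    intro st
    simp only [List.foldl, pvAFold, pvMod12]
    by_cases h : (midi + off) % 12 ∈ pcs
    · by_cases hd : |off| < st.2
      · simpa [h, hd] using ih (off, |off|)
      · simpa [h, hd] using ih st
    · simpa [h] using ih st

theorem pvShiftB (midi : Int) (pcs : List Int) :
    ∀ (ds : List Int),
      pvRingNote midi pcs ds
      = (pvBSearch (fun o => decide ((midi + o) % 12 ∈ pcs)) ds).map (fun o => midi + o) := by
  intro ds
  induction ds with
  | nil => simp [pvRingNote, pvBSearch]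
  | cons d rest ih =>
    simp only [pvRingNote, pvBSearch, pvMod12, sub_eq_add_neg]
    by_cases h1 : (midi + -d) % 12 ∈ pcs
    · simp [h1]
    · by_cases h2 : (midi + d) % 12 ∈ pcs
      · simp [h1, h2]
      · simp [h1, h2, ih]

-- ===== VERDICT (by name: the statement is the Claim_ definition above) =====
theorem nearest_scale_note_py_spec : Claim_equal_nearest_scale_note_py := by
  intro midi pcs _
  unfold Spec_nearest_scale_note_py nearest_scale_note_py nearest_scale_note_py_alt
  by_cases hp : pcs = []
  · simp [hp]
  · simp only [hp, if_false]
    have hA := pvShiftA midi pcs (PySem.List.pyRange (-6) 7 1) (0, 128)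
    rw [show midi + (0:Int) = midi by ring] at hA
    rw [hA, pvShiftB midi pcs (PySem.List.pyRange 0 7 1),
        pvKey (fun o => decide ((midi + o) % 12 ∈ pcs))]
    cases h : pvBSearch (fun o => decide ((midi + o) % 12 ∈ pcs)) (PySem.List.pyRange 0 7 1) with
    | none => simp
    | some o => simp
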